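-- pv_equiv track=rewrite | github.com/TylerMorley/advent-of-code | 2025/day04/day04.py | getMaxAccessibility
-- ===== SOURCE A (Python) =====
-- def getAdjacent(loc, grid):
--     adjacents = []
--     width = len(grid[0])
--     height = len(grid)
--     x,y = loc
--
--     right_okay = (x+1) < width
--     down_okay = (y+1) < height
--     left_okay = (x-1) >= 0
--     up_okay = (y-1) >= 0
--
--     if right_okay:
--         adjacents.append([x+1,y])
--         if down_okay:
--             adjacents.append([x+1,y+1])
--         if up_okay:
--             adjacents.append([x+1,y-1])
--     if down_okay:
--         adjacents.append([x,y+1])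
--     if left_okay:
--         adjacents.append([x-1,y])
--         if down_okay:
--             adjacents.append([x-1,y+1])
--         if up_okay:
--             adjacents.append([x-1,y-1])
--     if up_okay:
--         adjacents.append([x,y-1])
--
--     return adjacents
--
-- def countPaperRolls(locations, grid):
--     num_rolls = 0
--     for location in locations:
--         x,y = location
--         if grid[y][x] == '@':
--             num_rolls += 1
--
--     return num_rolls
--
-- def getForkliftAccessibility(grid, remove_rolls=False):
--     locs_accessible = []
--     for y in range(len(grid)):
--         for x in range(len(grid[y])):
--             if grid[y][x] == '@':
--                 adjacent = getAdjacent([x,y], grid)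
--                 num_adj_rolls = countPaperRolls(adjacent, grid)
--                 if num_adj_rolls < 4:
--                     locs_accessible.append([x,y])
--
--     if remove_rolls:
--         return locs_accessible
--     else:
--         return len(locs_accessible)
--
-- def removeRolls(to_remove, grid):
--     for location in to_remove:
--         x,y = location
--         temp = list(grid[y])
--         temp[x] = 'X'
--         grid[y] = ''.join(temp)
--
--     return grid
--
-- def getMaxAccessibility(input_grid):
--     num_accessible = 0
--     grid = input_grid.copy()
--     remove_rolls = True
--     to_remove = [[-1,-1]]
--     while len(to_remove) > 0:
--         to_remove = getForkliftAccessibility(grid, remove_rolls)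
--         num_accessible += len(to_remove)
--         grid = removeRolls(to_remove, grid)
--
--     return num_accessible
-- ===== SOURCE B (Python) =====
-- _OFFS = [(-1, -1), (-1, 0), (-1, 1), (0, -1), (0, 1), (1, -1), (1, 0), (1, 1)]
--
--
-- def getMaxAccessibility(input_grid):
--     rolls = set()
--     for y, row in enumerate(input_grid):
--         for x, c in enumerate(row):
--             if c == '@':
--                 rolls.add((x, y))
--     removed = set()
--
--     def live_deg(p):
--         x, y = p
--         return sum((x + dx, y + dy) in rolls and (x + dx, y + dy) not in removed
--                    for dx, dy in _OFFS)
--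
--     stack = [p for p in rolls if live_deg(p) < 4]
--     while stack:
--         p = stack.pop()
--         if p in removed:
--             continue
--         removed.add(p)
--         x, y = p
--         for dx, dy in _OFFS:
--             q = (x + dx, y + dy)
--             if q in rolls and q not in removed and live_deg(q) < 4:
--                 stack.append(q)
--     return len(removed)
-- ===== Notes on version B (the rewrite author's own statement) =====
-- stated objective: alternative
-- what changed: B replaces A's global re-scan rounds (rescan the whole grid each round, collect all accessible cells, rewrite the grid strings, repeat) by a one-at-a-time worklist peel over a set of roll coordinates: seed a stack with the initially accessible rolls, pop rolls one by one, and after each removal re-examine only the 8 neighbours of the removed roll, pushing any that became accessible; correctness rests on both processes leaving exactly the maximal subset in which every roll has >= 4 roll neighbours (the 4-core), which is proved in the Lean file.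
-- outside the precondition, e.g. on getMaxAccessibility(['@.X', '...', 'X@']): A raises IndexError, B returns 2; on getMaxAccessibility(['.@.', '.@@.', '@@@@', '@@@@.', '@@@@@']): A returns 16, B returns 4
import Mathlib
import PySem

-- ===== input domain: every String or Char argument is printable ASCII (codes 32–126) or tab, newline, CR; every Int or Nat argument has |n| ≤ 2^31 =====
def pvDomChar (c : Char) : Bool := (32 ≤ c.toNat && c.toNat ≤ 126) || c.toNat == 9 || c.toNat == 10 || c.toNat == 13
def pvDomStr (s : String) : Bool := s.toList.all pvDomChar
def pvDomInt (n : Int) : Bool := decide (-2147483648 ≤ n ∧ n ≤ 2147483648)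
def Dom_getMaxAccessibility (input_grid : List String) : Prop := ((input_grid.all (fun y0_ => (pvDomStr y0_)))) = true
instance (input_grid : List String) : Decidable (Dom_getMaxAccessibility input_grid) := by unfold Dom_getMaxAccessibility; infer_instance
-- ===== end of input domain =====

-- B replaces A's whole-grid re-scan rounds by a one-at-a-time worklist peel over roll coordinates
-- (re-examining only the 8 neighbours of each removed roll); objective: alternative; return value only.

-- ===== PORT A =====
-- grid[y][x]; the indices produced by A are always in range on Pre_, so the default is never read
def pvA_at (grid : List String) (x y : Int) : Char :=
  PySem.List.pyGetD (PySem.List.pyGetD grid y "").toList x ' '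

-- getAdjacent(loc, grid)
def pvA_adj (loc : Int × Int) (grid : List String) : List (Int × Int) :=
  let width : Int := PySem.List.len (PySem.List.pyGetD grid 0 "").toList
  let height : Int := PySem.List.len grid
  let x := loc.1
  let y := loc.2
  let right_okay := x + 1 < width
  let down_okay := y + 1 < height
  let left_okay := x - 1 ≥ 0
  let up_okay := y - 1 ≥ 0
  (if right_okay then
      [(x+1, y)] ++ (if down_okay then [(x+1, y+1)] else [])
                 ++ (if up_okay then [(x+1, y-1)] else [])
    else [])
  ++ (if down_okay then [(x, y+1)] else [])
  ++ (if left_okay then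
      [(x-1, y)] ++ (if down_okay then [(x-1, y+1)] else [])
                 ++ (if up_okay then [(x-1, y-1)] else [])
    else [])
  ++ (if up_okay then [(x, y-1)] else [])

-- countPaperRolls(locations, grid)
def pvA_count (locations : List (Int × Int)) (grid : List String) : Int :=
  locations.foldl (fun num_rolls loc =>
    if pvA_at grid loc.1 loc.2 == '@' then num_rolls + 1 else num_rolls) 0

-- getForkliftAccessibility(grid, remove_rolls=True): the locs_accessible list (A only calls it with True)
def pvA_access (grid : List String) : List (Int × Int) :=
  (PySem.List.pyRange 0 (PySem.List.len grid) 1).foldl (fun acc y =>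
    (PySem.List.pyRange 0 (PySem.List.len (PySem.List.pyGetD grid y "").toList) 1).foldl (fun acc x =>
      if pvA_at grid x y == '@' then
        (if pvA_count (pvA_adj (x, y) grid) grid < 4 then acc ++ [(x, y)] else acc)
      else acc) acc) []

-- removeRolls(to_remove, grid)
def pvA_remove (to_remove : List (Int × Int)) (grid : List String) : List String :=
  to_remove.foldl (fun g loc =>
    let temp := PySem.List.pySetD (PySem.List.pyGetD g loc.2 "").toList loc.1 'X'
    PySem.List.pySetD g loc.2 (String.ofList temp)) grid

-- the while loop; fuel = number of '@' cells + 1 bounds the iteration count (each continuing round removes ≥ 1 roll)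
def pvA_loop : Nat → List String → Int → Int
  | 0, _, num_accessible => num_accessible
  | n + 1, grid, num_accessible =>
      let to_remove := pvA_access grid
      let num_accessible := num_accessible + (to_remove.length : Int)
      let grid := pvA_remove to_remove grid
      if to_remove.length > 0 then pvA_loop n grid num_accessible else num_accessible

def getMaxAccessibility (input_grid : List String) : Int :=
  pvA_loop ((input_grid.map (fun r => r.toList.count '@')).sum + 1) input_grid 0

-- ===== PORT B =====
-- _OFFS
def pvOffs : List (Int × Int) :=
  [(-1, -1), (-1, 0), (-1, 1), (0, -1), (0, 1), (1, -1), (1, 0), (1, 1)]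

-- the initial scan building the set of roll coordinates
def pvB_rolls (input_grid : List String) : PySem.Set (Int × Int) :=
  PySem.Set.ofList ((PySem.List.enumerate input_grid 0).flatMap (fun yr =>
    ((PySem.List.enumerate yr.2.toList 0).filter (fun xc => xc.2 == '@')).map (fun xc => (xc.1, yr.1))))

-- live_deg(p): number of the 8 neighbours that are rolls and not yet removed
def pvB_liveDeg (rolls removed : PySem.Set (Int × Int)) (p : Int × Int) : Int :=
  (pvOffs.map (fun d =>
    if PySem.Set.contains rolls (p.1 + d.1, p.2 + d.2)
        && !PySem.Set.contains removed (p.1 + d.1, p.2 + d.2)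
    then (1 : Int) else 0)).sum

-- the while loop over the worklist; fuel = 9*|rolls|+1 bounds the pops (≤ |rolls| initial pushes, ≤ 8 per removal)
def pvB_loop : Nat → List (Int × Int) → PySem.Set (Int × Int) → PySem.Set (Int × Int) → Int
  | 0, _, _, removed => (removed.length : Int)
  | n + 1, stack, rolls, removed =>
    match stack.getLast? with
    | none => (removed.length : Int)
    | some p =>
      let stack := stack.dropLast
      if PySem.Set.contains removed p then pvB_loop n stack rolls removed
      else
        let removed := PySem.Set.add removed p
        let stack := pvOffs.foldl (fun st d =>
          let q := (p.1 + d.1, p.2 + d.2)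
          if PySem.Set.contains rolls q && !PySem.Set.contains removed q
              && pvB_liveDeg rolls removed q < 4
          then st ++ [q] else st) stack
        pvB_loop n stack rolls removed

def getMaxAccessibility_alt (input_grid : List String) : Int :=
  let rolls := pvB_rolls input_grid
  let removed : PySem.Set (Int × Int) := PySem.Set.empty
  let stack := rolls.filter (fun p => pvB_liveDeg rolls removed p < 4)
  pvB_loop (9 * rolls.length + 1) stack rolls removed

-- ===== PRECONDITION & SPEC =====
-- Pre_ excludes ragged grids (rows of differing length) that contain '@': there A indexes neighbour
-- coordinates of every row by the FIRST row's width and may raise IndexError (or, where it happens to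
-- return, its neighbour counts are an accident of that width); '@'-free grids are kept whatever their shape.
def Pre_getMaxAccessibility (input_grid : List String) : Prop :=
  (∀ r ∈ input_grid, '@' ∉ r.toList) ∨
  (∀ r ∈ input_grid, r.toList.length = (input_grid.headD "").toList.length)
instance (input_grid : List String) : Decidable (Pre_getMaxAccessibility input_grid) := by
  unfold Pre_getMaxAccessibility; infer_instance

def pvWitness_getMaxAccessibility : List String := ["@.", ".@"]

def Spec_getMaxAccessibility (input_grid : List String) (out : Int) : Prop := out = getMaxAccessibility_alt input_grid
instance (input_grid : List String) (out : Int) : Decidable (Spec_getMaxAccessibility input_grid out) := by unfold Spec_getMaxAccessibility; infer_instance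

-- ===== CLAIM (what is proved, stated in full; the proofs are below) =====
def Claim_equal_getMaxAccessibility : Prop := ∀ (input_grid : List String), Dom_getMaxAccessibility input_grid → Pre_getMaxAccessibility input_grid → Spec_getMaxAccessibility input_grid (getMaxAccessibility input_grid)

-- ===== LEMMAS AND PROOFS =====

-- proof-side vocabulary
def rowLen (g : List String) (y : Nat) : Nat := (g.getD y "").toList.length
def atN (g : List String) (x y : Nat) : Char := (g.getD y "").toList.getD x ' '
def coords (g : List String) : List (Int × Int) :=
  (List.range g.length).flatMap (fun y =>
    ((List.range (rowLen g y)).filter (fun x => atN g x y == '@')).map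
      (fun x : Nat => ((x : Int), (y : Int))))
def Rect (g : List String) : Prop := ∀ r ∈ g, r.toList.length = rowLen g 0

-- the round-based peel over the coordinate set (A's process, grid-free), and its remaining set
def pvR_nbrs (rolls : PySem.Set (Int × Int)) (x y : Int) : Int :=
  (([(-1, -1), (-1, 0), (-1, 1), (0, -1), (0, 1), (1, -1), (1, 0), (1, 1)] : List (Int × Int)).map
    (fun d => if PySem.Set.contains rolls (x + d.1, y + d.2) then (1 : Int) else 0)).sum

def pvR_loop : Nat → PySem.Set (Int × Int) → Int → Int
  | 0, _, total => total
  | n + 1, rolls, total =>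
      let removable := PySem.Set.ofList (rolls.filter (fun p => pvR_nbrs rolls p.1 p.2 < 4))
      if removable.isEmpty then total
      else pvR_loop n (PySem.Set.diff rolls removable) (total + (removable.length : Int))

def pvCore : Nat → PySem.Set (Int × Int) → PySem.Set (Int × Int)
  | 0, S => S
  | n + 1, S =>
      let removable := PySem.Set.ofList (S.filter (fun p => pvR_nbrs S p.1 p.2 < 4))
      if removable.isEmpty then S else pvCore n (PySem.Set.diff S removable)

-- degree of p inside T, and the live (not yet removed) part of S
def degL (T : List (Int × Int)) (p : Int × Int) : Nat :=
  pvOffs.countP (fun d => decide ((p.1 + d.1, p.2 + d.2) ∈ T))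
def pvRem (S R : List (Int × Int)) : List (Int × Int) :=
  S.filter (fun r => !(PySem.Set.contains R r))
def pvClosed (S U : List (Int × Int)) : Prop := U ⊆ S ∧ ∀ p ∈ U, 4 ≤ degL U p

theorem filterRange_count {α} [BEq α] [LawfulBEq α] (l : List α) (d c : α) :
    ((List.range l.length).filter (fun i => l.getD i d == c)).length = l.count c := by
  induction l with
  | nil => simp
  | cons a t ih =>
    rw [List.length_cons, List.range_succ_eq_map, List.filter_cons]
    simp only [List.getD, List.filter_map, Function.comp_def, List.count_cons] at *
    split <;> simp_all

theorem map_range_getD {α β} (g : List α) (d : α) (F : α → β) :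
    (List.range g.length).map (fun i => F (g.getD i d)) = g.map F := by
  apply List.ext_getElem
  · simp
  · intro i h1 h2
    rw [List.length_map] at h2
    simp [List.getD, List.getElem?_eq_getElem h2]

theorem coords_length (g : List String) :
    (coords g).length = (g.map (fun r => r.toList.count '@')).sum := by
  have h : ∀ y, (((List.range (rowLen g y)).filter (fun x => atN g x y == '@')).map
      (fun x : Nat => ((x : Int), (y : Int)))).length = (g.getD y "").toList.count '@' := by
    intro y
    rw [List.length_map]
    have := filterRange_count (g.getD y "").toList ' ' '@'
    simpa [rowLen, atN] using this
  rw [coords, List.length_flatMap,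
    ← map_range_getD g "" (fun r => r.toList.count '@')]
  congr 1
  apply List.map_congr_left
  intro y _
  exact h y

theorem mem_coords (g : List String) (q : Int × Int) :
    q ∈ coords g ↔ 0 ≤ q.1 ∧ 0 ≤ q.2 ∧ q.2.toNat < g.length ∧
      q.1.toNat < rowLen g q.2.toNat ∧ atN g q.1.toNat q.2.toNat = '@' := by
  obtain ⟨a, b⟩ := q
  simp only [coords, List.mem_flatMap, List.mem_map, List.mem_filter, List.mem_range]
  constructor
  · rintro ⟨y, hy, x, hxf, heq⟩
    obtain ⟨hx, hat⟩ := hxf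
    rw [Prod.mk.injEq] at heq
    obtain ⟨h1, h2⟩ := heq
    subst h1; subst h2
    refine ⟨Int.natCast_nonneg x, Int.natCast_nonneg y, ?_, ?_, ?_⟩ <;> simp_all
  · rintro ⟨ha, hb, hbl, hal, hat⟩
    refine ⟨b.toNat, hbl, a.toNat, ?_, ?_⟩
    · exact ⟨hal, by simpa using hat⟩
    · simp [Int.toNat_of_nonneg ha, Int.toNat_of_nonneg hb]

theorem nodup_coords (g : List String) : (coords g).Nodup := by
  rw [coords, List.nodup_flatMap]
  constructor
  · intro y _
    apply List.Nodup.map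
    · intro u v h
      simpa using congrArg Prod.fst h
    · exact (List.nodup_range).filter _
  · apply List.Pairwise.imp ?_ (List.pairwise_lt_range)
    intro a b hab
    intro p hp hq
    simp only [List.mem_map, List.mem_filter] at hp hq
    obtain ⟨u, _, rfl⟩ := hp
    obtain ⟨v, _, hv⟩ := hq
    have := congrArg Prod.snd hv
    simp at this
    omega

theorem rollsB_eq (g : List String) : pvB_rolls g = coords g := by
  have hL : ((PySem.List.enumerate g 0).flatMap (fun yr =>
      ((PySem.List.enumerate yr.2.toList 0).filter (fun xc => xc.2 == '@')).map
        (fun xc => (xc.1, yr.1)))) = coords g := by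
    rw [PySem.List.enumerate_eq_map_pyRange g "", PySem.List.len_eq, PySem.List.pyRange_zero_nat,
      List.flatMap_map, List.flatMap_map, coords]
    apply List.flatMap_congr
    intro y _
    rw [PySem.List.enumerate_eq_map_pyRange _ ' ', PySem.List.len_eq, PySem.List.pyRange_zero_nat,
      List.map_map, List.filter_map, List.map_map]
    simp only [Function.comp_def, PySem.List.pyGetD_natCast]
    rfl
  rw [pvB_rolls, hL, PySem.Set.ofList_eq_self_of_nodup _ (nodup_coords g)]

theorem filter_coords (g : List String) (q : Int × Int → Bool) :
    (coords g).filter q = (List.range g.length).flatMap (fun y =>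
      ((List.range (rowLen g y)).filter (fun x => atN g x y == '@' && q ((x : Int), (y : Int)))).map
        (fun x : Nat => ((x : Int), (y : Int)))) := by
  rw [coords, List.filter_flatMap]
  apply List.flatMap_congr ?_
  intro y _
  rw [List.filter_map, List.filter_filter]
  refine congrArg _ ?_
  apply List.filter_congr
  intro x _
  simp [Function.comp_def, Bool.and_comm]

theorem atI (g : List String) (x y : Nat) : pvA_at g (x : Int) (y : Int) = atN g x y := by
  simp [pvA_at, atN]

theorem accessA_eq (g : List String) :
    pvA_access g = (coords g).filter (fun p => decide (pvA_count (pvA_adj p g) g < 4)) := by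
  rw [filter_coords]
  have hinner : ∀ (y : Nat) (acc : List (Int × Int)),
      (PySem.List.pyRange 0 (PySem.List.len (PySem.List.pyGetD g (y : Int) "").toList) 1).foldl
        (fun acc x => if pvA_at g x (y : Int) == '@' then
          (if pvA_count (pvA_adj (x, (y : Int)) g) g < 4 then acc ++ [(x, (y : Int))] else acc)
          else acc) acc
      = acc ++ ((List.range (rowLen g y)).filter
          (fun x => atN g x y == '@' && decide (pvA_count (pvA_adj ((x : Int), (y : Int)) g) g < 4))).map
          (fun x : Nat => ((x : Int), (y : Int))) := by
    intro y acc
    rw [PySem.List.pyGetD_natCast]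
    rw [show PySem.List.len (g.getD y "").toList = ((rowLen g y : Nat) : Int) by
      simp [PySem.List.len_eq, rowLen]]
    rw [PySem.List.pyRange_zero_nat, List.foldl_map]
    rw [PySem.List.foldl_congr_mem _ _ (fun acc (k : Nat) =>
      if (atN g k y == '@' && decide (pvA_count (pvA_adj ((k : Int), (y : Int)) g) g < 4))
      then acc ++ [((k : Int), (y : Int))] else acc) _ (by
        intro acc k _
        rw [atI]
        by_cases h1 : (atN g k y == '@') = true <;>
          by_cases h2 : pvA_count (pvA_adj ((k : Int), (y : Int)) g) g < 4 <;>
          simp [h1, h2])]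
    rw [PySem.List.foldl_append_if]
  rw [pvA_access, PySem.List.len_eq, PySem.List.pyRange_zero_nat, List.foldl_map]
  rw [PySem.List.foldl_congr_mem _ _ (fun acc (y : Nat) =>
    acc ++ ((List.range (rowLen g y)).filter
      (fun x => atN g x y == '@' && decide (pvA_count (pvA_adj ((x : Int), (y : Int)) g) g < 4))).map
      (fun x : Nat => ((x : Int), (y : Int)))) _ (fun acc y _ => hinner y acc)]
  rw [PySem.List.foldl_append_eq_flatMap, List.nil_append]

theorem pvA_at_nonneg (g : List String) (a b : Int) (ha : 0 ≤ a) (hb : 0 ≤ b) :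
    pvA_at g a b = atN g a.toNat b.toNat := by
  obtain ⟨a', rfl⟩ := Int.eq_ofNat_of_zero_le ha
  obtain ⟨b', rfl⟩ := Int.eq_ofNat_of_zero_le hb
  simp [pvA_at, atN]

theorem count_eq_nbrs (g : List String) (hrect : Rect g) (x y : Nat)
    (hy : y < g.length) (hx : x < rowLen g 0) :
    pvA_count (pvA_adj ((x : Int), (y : Int)) g) g = pvR_nbrs (coords g) (x : Int) (y : Int) := by
  have hw : ∀ b : Nat, b < g.length → rowLen g b = rowLen g 0 := by
    intro b hb
    have hmem : g[b] ∈ g := List.getElem_mem _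
    have h2 := hrect g[b] hmem
    simp only [rowLen, List.getD_eq_getElem g "" hb]
    simpa [rowLen] using h2
  have hterm : ∀ a b : Int, (if PySem.Set.contains (coords g) (a, b) then (1 : Int) else 0)
      = (if 0 ≤ a ∧ 0 ≤ b ∧ b < (g.length : Int) ∧ a < (rowLen g 0 : Int) ∧
            atN g a.toNat b.toNat = '@' then (1 : Int) else 0) := by
    intro a b
    refine if_congr ?_ rfl rfl
    rw [PySem.Set.contains_iff, mem_coords]
    dsimp only
    constructor
    · rintro ⟨h1, h2, h3, h4, h5⟩
      have := hw b.toNat h3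
      refine ⟨h1, h2, by omega, by omega, h5⟩
    · rintro ⟨h1, h2, h3, h4, h5⟩
      have h3' : b.toNat < g.length := by omega
      have := hw b.toNat h3'
      exact ⟨h1, h2, by omega, by omega, h5⟩
  have c1 : (0 : Int) ≤ (x : Int) + 1 := by omega
  have c2 : (0 : Int) ≤ (x : Int) := by omega
  have c3 : (0 : Int) ≤ (y : Int) + 1 := by omega
  have c4 : (0 : Int) ≤ (y : Int) := by omega
  have b1 : (x : Int) < ((rowLen g 0 : Nat) : Int) := by omega
  have b2 : (x : Int) + -1 < ((rowLen g 0 : Nat) : Int) := by omega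
  have b3 : (y : Int) < ((g.length : Nat) : Int) := by omega
  have b4 : (y : Int) + -1 < ((g.length : Nat) : Int) := by omega
  have t1 : ((x : Int) + 1).toNat = x + 1 := by omega
  have t2 : ((x : Int) + -1).toNat = x - 1 := by omega
  have t3 : ((x : Int) - 1).toNat = x - 1 := by omega
  have t4 : ((y : Int) + 1).toNat = y + 1 := by omega
  have t5 : ((y : Int) + -1).toNat = y - 1 := by omega
  have t6 : ((y : Int) - 1).toNat = y - 1 := by omega
  rw [pvA_count, PySem.List.foldl_if_add_one, zero_add, pvR_nbrs]
  simp only [List.map_cons, List.map_nil, List.sum_cons, List.sum_nil, add_zero, hterm]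
  simp only [pvA_adj, PySem.List.pyGetD_zero, PySem.List.len_eq]
  rw [show ((g.getD 0 "").toList.length : Int) = ((rowLen g 0 : Nat) : Int) by simp [rowLen]]
  by_cases hR : (x : Int) + 1 < ((rowLen g 0 : Nat) : Int) <;>
    by_cases hD : (y : Int) + 1 < ((g.length : Nat) : Int) <;>
      by_cases hL : (0 : Int) ≤ (x : Int) + -1 <;>
        by_cases hU : (0 : Int) ≤ (y : Int) + -1
  all_goals (
    simp only [ge_iff_le, sub_eq_add_neg, hR, hD, hL, hU, if_true, if_false,
      List.countP_append, List.countP_cons, List.countP_nil,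
      ite_true, ite_false, true_and, and_true,
      c1, c2, c3, c4, b1, b2, b3, b4, hy, hx]
    try simp only [decide_eq_true_eq]
    try rw [pvA_at_nonneg g ((x : Int) + 1) ((y : Int)) (by omega) (by omega)]
    try rw [pvA_at_nonneg g ((x : Int) + 1) ((y : Int) + 1) (by omega) (by omega)]
    try rw [pvA_at_nonneg g ((x : Int) + 1) ((y : Int) + -1) (by omega) (by omega)]
    try rw [pvA_at_nonneg g ((x : Int)) ((y : Int) + 1) (by omega) (by omega)]
    try rw [pvA_at_nonneg g ((x : Int) + -1) ((y : Int)) (by omega) (by omega)]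
    try rw [pvA_at_nonneg g ((x : Int) + -1) ((y : Int) + 1) (by omega) (by omega)]
    try rw [pvA_at_nonneg g ((x : Int) + -1) ((y : Int) + -1) (by omega) (by omega)]
    try rw [pvA_at_nonneg g ((x : Int)) ((y : Int) + -1) (by omega) (by omega)]
    try simp only [t1, t2, t3, t4, t5, t6, Int.toNat_natCast, beq_iff_eq]
    try push_cast
    try simp only [false_and, and_false, ite_false]
    try ring
    try omega)

theorem remove_at (g : List String) (tr : List (Int × Int))
    (htr : ∀ p ∈ tr, ∃ a b : Nat, p = ((a : Int), (b : Int)) ∧ b < g.length ∧ a < rowLen g b) :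
    (pvA_remove tr g).length = g.length ∧
    (∀ y, rowLen (pvA_remove tr g) y = rowLen g y) ∧
    (∀ x y, y < g.length → x < rowLen g y →
      atN (pvA_remove tr g) x y = if ((x : Int), (y : Int)) ∈ tr then 'X' else atN g x y) := by
  induction tr generalizing g with
  | nil => exact ⟨rfl, fun y => rfl, fun x y _ _ => by simp [pvA_remove]⟩
  | cons p tr ih =>
    obtain ⟨a, b, rfl, hb, ha⟩ := htr _ (List.mem_cons_self ..)
    have hstep : pvA_remove (((a : Int), (b : Int)) :: tr) g
        = pvA_remove tr (g.set b (String.ofList ((g.getD b "").toList.set a 'X'))) := by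
      simp [pvA_remove, List.getD]
    set g1 := g.set b (String.ofList ((g.getD b "").toList.set a 'X')) with hg1
    have hlen : g1.length = g.length := by simp [hg1]
    have hrowget : ∀ y : Nat, g1.getD y ""
        = if y = b then String.ofList ((g.getD b "").toList.set a 'X') else g.getD y "" := by
      intro y
      by_cases hyb : y = b
      · subst hyb
        simp [hg1, List.getD, List.getElem?_set, hb]
      · simp [hg1, List.getD, List.getElem?_set, Ne.symm hyb, hyb]
    have hrow : ∀ y, rowLen g1 y = rowLen g y := by
      intro y
      rw [rowLen, hrowget y]
      by_cases hyb : y = b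
      · subst hyb; simp [rowLen]
      · simp [hyb, rowLen]
    have hat1 : ∀ u v : Nat, atN g1 u v = if u = a ∧ v = b then 'X' else atN g u v := by
      intro u v
      rw [atN, hrowget v]
      by_cases hvb : v = b
      · subst hvb
        rw [if_pos rfl]
        by_cases hua : u = a
        · subst hua
          have hlt : u < (g.getD v "").toList.length := ha
          have hlt2 : u < (g[v]?.getD "").length := by simpa [List.getD] using hlt
          simp [String.toList_ofList, List.getD, List.getElem?_set, hlt2]
        · have hau : a ≠ u := Ne.symm hua
          simp [String.toList_ofList, List.getD, List.getElem?_set, hau, hua, atN]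
      · simp [hvb, atN]
    have htr' : ∀ p ∈ tr, ∃ a b : Nat, p = ((a : Int), (b : Int)) ∧ b < g1.length ∧ a < rowLen g1 b := by
      intro p hp
      obtain ⟨a', b', rfl, hb', ha'⟩ := htr _ (List.mem_cons_of_mem _ hp)
      exact ⟨a', b', rfl, by omega, by rw [hrow]; exact ha'⟩
    obtain ⟨ih1, ih2, ih3⟩ := ih g1 htr'
    refine ⟨by rw [hstep, ih1, hlen], fun y => by rw [hstep, ih2, hrow], ?_⟩
    intro x y hy hx
    rw [hstep, ih3 x y (by omega) (by rw [hrow]; exact hx)]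
    by_cases hmem : ((x : Int), (y : Int)) ∈ tr
    · simp [hmem]
    · rw [if_neg hmem, hat1 x y]
      by_cases hpa : x = a ∧ y = b
      · obtain ⟨rfl, rfl⟩ := hpa
        simp
      · rw [if_neg hpa, if_neg]
        intro hc
        rcases List.mem_cons.mp hc with hc1 | hc2
        · rw [Prod.mk.injEq] at hc1
          exact hpa ⟨by exact_mod_cast hc1.1, by exact_mod_cast hc1.2⟩
        · exact hmem hc2

theorem filters_eq (g : List String) (hrect : Rect g) :
    (coords g).filter (fun p => decide (pvA_count (pvA_adj p g) g < 4))
      = (coords g).filter (fun p => decide (pvR_nbrs (coords g) p.1 p.2 < 4)) := by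
  apply List.filter_congr
  intro p hp
  obtain ⟨h1, h2, h3, h4, h5⟩ := (mem_coords g p).mp hp
  have hw0 : rowLen g p.2.toNat = rowLen g 0 := by
    have hmem : g[p.2.toNat] ∈ g := List.getElem_mem _
    have := hrect g[p.2.toNat] hmem
    simpa [rowLen, List.getD, List.getElem?_eq_getElem h3] using this
  have hcnt := count_eq_nbrs g hrect p.1.toNat p.2.toNat h3 (by omega)
  have hpe : ((p.1.toNat : Int), (p.2.toNat : Int)) = p := by
    obtain ⟨a, b⟩ := p
    simp only [Prod.mk.injEq]
    constructor <;> omega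
  rw [hpe] at hcnt
  rw [hcnt]
  have e1 : ((p.1.toNat : Nat) : Int) = p.1 := by omega
  have e2 : ((p.2.toNat : Nat) : Int) = p.2 := by omega
  rw [e1, e2]

theorem coords_remove (g : List String) (_hrect : Rect g) (L : List (Int × Int))
    (hL : ∀ p ∈ L, p ∈ coords g) :
    coords (pvA_remove L g) = (coords g).filter (fun p => !(L.contains p)) := by
  have htr : ∀ p ∈ L, ∃ a b : Nat, p = ((a : Int), (b : Int)) ∧ b < g.length ∧ a < rowLen g b := by
    intro p hp
    obtain ⟨h1, h2, h3, h4, h5⟩ := (mem_coords g p).mp (hL p hp)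
    exact ⟨p.1.toNat, p.2.toNat, by obtain ⟨a, b⟩ := p; simp only [Prod.mk.injEq]; constructor <;> omega,
      h3, h4⟩
  obtain ⟨r1, r2, r3⟩ := remove_at g L htr
  rw [filter_coords, coords, r1]
  apply List.flatMap_congr
  intro y hy
  rw [List.mem_range] at hy
  rw [r2 y]
  refine congrArg _ ?_
  apply List.filter_congr
  intro x hx
  rw [List.mem_range] at hx
  rw [r3 x y hy hx]
  by_cases hmem : ((x : Int), (y : Int)) ∈ L
  · simp [hmem]
  · simp [hmem]

theorem rect_remove (g : List String) (L : List (Int × Int))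
    (htr : ∀ p ∈ L, ∃ a b : Nat, p = ((a : Int), (b : Int)) ∧ b < g.length ∧ a < rowLen g b)
    (hrect : Rect g) : Rect (pvA_remove L g) := by
  obtain ⟨r1, r2, r3⟩ := remove_at g L htr
  intro r hr
  obtain ⟨i, hi, rfl⟩ := List.getElem_of_mem hr
  have hi' : i < g.length := by omega
  have e1 : (pvA_remove L g)[i].toList.length = rowLen (pvA_remove L g) i := by
    simp [rowLen, List.getD, List.getElem?_eq_getElem hi]
  rw [e1, r2 i]
  have e2 : rowLen g i = g[i].toList.length := by
    simp [rowLen, List.getD, List.getElem?_eq_getElem hi']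
  rw [e2]
  have := hrect g[i] (List.getElem_mem _)
  rw [this]
  have : rowLen (pvA_remove L g) 0 = rowLen g 0 := r2 0
  simp [rowLen] at this ⊢
  omega

theorem loop_eq (n : Nat) (g : List String) (acc : Int) (hrect : Rect g) :
    pvA_loop n g acc = pvR_loop n (coords g) acc := by
  induction n generalizing g acc with
  | zero => rfl
  | succ n ih =>
    rw [pvA_loop, pvR_loop]
    set L := (coords g).filter (fun p => decide (pvR_nbrs (coords g) p.1 p.2 < 4)) with hLdef
    have hacc : pvA_access g = L := by rw [accessA_eq, filters_eq g hrect]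
    have hnodupL : L.Nodup := (nodup_coords g).filter _
    have hofL : PySem.Set.ofList L = L := PySem.Set.ofList_eq_self_of_nodup _ hnodupL
    have hLsub : ∀ p ∈ L, p ∈ coords g := fun p hp => (List.mem_filter.mp hp).1
    simp only [hacc, hofL]
    by_cases hnil : L = []
    · simp [hnil, List.isEmpty_nil]
    · have hlen : L.length > 0 := List.length_pos_iff.mpr hnil
      rw [if_pos hlen, if_neg (by simpa [List.isEmpty_iff] using hnil)]
      have htr : ∀ p ∈ L, ∃ a b : Nat, p = ((a : Int), (b : Int)) ∧ b < g.length ∧ a < rowLen g b := by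
        intro p hp
        obtain ⟨h1, h2, h3, h4, h5⟩ := (mem_coords g p).mp (hLsub p hp)
        exact ⟨p.1.toNat, p.2.toNat,
          by obtain ⟨a, b⟩ := p; simp only [Prod.mk.injEq]; constructor <;> omega, h3, h4⟩
      have hrect' : Rect (pvA_remove L g) := rect_remove g L htr hrect
      rw [ih (pvA_remove L g) _ hrect', coords_remove g hrect L hLsub]
      rfl


-- ===== B-side: both processes compute |rolls| minus the size of the 4-core =====

theorem nbrs_eq_degL (S : List (Int × Int)) (x y : Int) :
    pvR_nbrs S x y = (degL S (x, y) : Int) := by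
  rw [pvR_nbrs, PySem.List.sum_map_ite_one_zero, degL]
  simp only [pvOffs]
  norm_cast
  apply List.countP_congr
  intro d _
  simp [PySem.Set.contains_iff]

theorem liveDeg_eq (S R : List (Int × Int)) (q : Int × Int) :
    pvB_liveDeg S R q = (degL (pvRem S R) q : Int) := by
  rw [pvB_liveDeg, PySem.List.sum_map_ite_one_zero, degL]
  norm_cast
  apply List.countP_congr
  intro d _
  simp [pvRem, List.mem_filter, PySem.Set.contains_iff]

theorem degL_mono {T U : List (Int × Int)} (q : Int × Int) (h : T ⊆ U) :
    degL T q ≤ degL U q := by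
  apply List.countP_mono_left
  intro d _
  simp only [decide_eq_true_eq]
  exact fun hm => h hm

theorem diff_filter (S : List (Int × Int)) (pr : Int × Int → Bool) (hS : S.Nodup) :
    PySem.Set.diff S (PySem.Set.ofList (S.filter pr)) = S.filter (fun x => !pr x) := by
  rw [PySem.Set.ofList_eq_self_of_nodup _ (hS.filter pr)]
  show S.filter _ = _
  apply List.filter_congr
  intro x hx
  by_cases hpx : pr x = true
  · simp [List.contains_iff_mem, List.mem_filter, hx, hpx]
  · simp [List.contains_iff_mem, List.mem_filter, hpx]

theorem removable_empty_iff (S : List (Int × Int)) (pr : Int × Int → Bool) (hS : S.Nodup) :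
    (PySem.Set.ofList (S.filter pr)).isEmpty = true ↔ ∀ x ∈ S, pr x = false := by
  rw [PySem.Set.ofList_eq_self_of_nodup _ (hS.filter pr), List.isEmpty_iff,
    List.filter_eq_nil_iff]
  constructor
  · intro h x hx
    by_cases hpx : pr x = true
    · exact absurd hpx (h x hx)
    · simpa using hpx
  · intro h x hx
    simp [h x hx]

theorem core_nodup (n : Nat) (S : List (Int × Int)) (hS : S.Nodup) : (pvCore n S).Nodup := by
  induction n generalizing S with
  | zero => exact hS
  | succ n ih =>
    rw [pvCore]
    split
    · exact hS
    · exact ih _ (PySem.Set.nodup_diff _ _ hS)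

theorem count_loop (n : Nat) (S : List (Int × Int)) (acc : Int) (hS : S.Nodup) :
    pvR_loop n S acc = acc + (S.length : Int) - ((pvCore n S).length : Int) := by
  induction n generalizing S acc with
  | zero => simp [pvR_loop, pvCore]
  | succ n ih =>
    rw [pvR_loop, pvCore]
    by_cases he : (PySem.Set.ofList (S.filter (fun p => pvR_nbrs S p.1 p.2 < 4))).isEmpty = true
    · rw [if_pos he, if_pos he]; ring
    · rw [if_neg he, if_neg he]
      have hnd : (PySem.Set.diff S (PySem.Set.ofList (S.filter (fun p => pvR_nbrs S p.1 p.2 < 4)))).Nodup :=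
        PySem.Set.nodup_diff _ _ hS
      rw [ih _ _ hnd]
      have hlen : (PySem.Set.ofList (S.filter (fun p => pvR_nbrs S p.1 p.2 < 4))).length
          + (PySem.Set.diff S (PySem.Set.ofList (S.filter (fun p => pvR_nbrs S p.1 p.2 < 4)))).length
          = S.length := by
        rw [diff_filter _ _ hS, PySem.Set.ofList_eq_self_of_nodup _ (hS.filter _)]
        exact (List.length_eq_length_filter_add _).symm
      have := congrArg (fun k : Nat => (k : Int)) hlen
      push_cast at this ⊢
      omega

theorem core_closed (n : Nat) (S : List (Int × Int)) (hS : S.Nodup) (hf : S.length < n) :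
    pvClosed S (pvCore n S) := by
  induction n generalizing S with
  | zero => omega
  | succ n ih =>
    rw [pvCore]
    by_cases he : (PySem.Set.ofList (S.filter (fun p => pvR_nbrs S p.1 p.2 < 4))).isEmpty = true
    · rw [if_pos he]
      refine ⟨fun _ h => h, ?_⟩
      intro p hp
      have := (removable_empty_iff S _ hS).mp he p hp
      rw [nbrs_eq_degL] at this
      have hpe : ((p.1, p.2) : Int × Int) = p := rfl
      rw [hpe] at this
      simp only [decide_eq_false_iff_not, not_lt] at this
      omega
    · rw [if_neg he]
      set S' := PySem.Set.diff S (PySem.Set.ofList (S.filter (fun p => pvR_nbrs S p.1 p.2 < 4))) with hS'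
      have hS'nd : S'.Nodup := PySem.Set.nodup_diff _ _ hS
      have hS'sub : S' ⊆ S := fun x hx => ((PySem.Set.mem_diff _ _ x).mp hx).1
      have hstrict : S'.length < S.length := by
        rw [hS', diff_filter _ _ hS]
        have hne : S.filter (fun p => pvR_nbrs S p.1 p.2 < 4) ≠ [] := by
          intro hc
          apply he
          rw [hc]
          rfl
        obtain ⟨x, hx⟩ := List.exists_mem_of_ne_nil _ hne
        obtain ⟨hxS, hxp⟩ := List.mem_filter.mp hx
        calc (S.filter (fun x => !decide (pvR_nbrs S x.1 x.2 < 4))).length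
            < (S.filter (fun p => decide (pvR_nbrs S p.1 p.2 < 4))).length
              + (S.filter (fun x => !decide (pvR_nbrs S x.1 x.2 < 4))).length := by
              have : 0 < (S.filter (fun p => decide (pvR_nbrs S p.1 p.2 < 4))).length :=
                List.length_pos_iff.mpr (by intro hc; rw [hc] at hx; cases hx)
              omega
          _ = S.length := (List.length_eq_length_filter_add _).symm
      obtain ⟨ih1, ih2⟩ := ih S' hS'nd (by omega)
      exact ⟨fun x hx => hS'sub (ih1 hx), ih2⟩

theorem core_max (n : Nat) (S U : List (Int × Int)) (hS : S.Nodup) (hU : pvClosed S U) :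
    U ⊆ pvCore n S := by
  induction n generalizing S with
  | zero => exact hU.1
  | succ n ih =>
    rw [pvCore]
    by_cases he : (PySem.Set.ofList (S.filter (fun p => pvR_nbrs S p.1 p.2 < 4))).isEmpty = true
    · rw [if_pos he]; exact hU.1
    · rw [if_neg he]
      set S' := PySem.Set.diff S (PySem.Set.ofList (S.filter (fun p => pvR_nbrs S p.1 p.2 < 4))) with hS'
      have hUS' : U ⊆ S' := by
        intro x hx
        rw [hS', diff_filter _ _ hS, List.mem_filter]
        refine ⟨hU.1 hx, ?_⟩
        have h4 : 4 ≤ degL U x := hU.2 x hx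
        have hm : degL U x ≤ degL S x := degL_mono x hU.1
        rw [nbrs_eq_degL]
        have hx2 : ((x.1, x.2) : Int × Int) = x := rfl
        rw [hx2]
        simp only [Bool.not_eq_true', decide_eq_false_iff_not, not_lt]
        omega
      exact ih S' (PySem.Set.nodup_diff _ _ hS) ⟨hUS', hU.2⟩


theorem offs_neg : ∀ d ∈ pvOffs, ((-d.1, -d.2) : Int × Int) ∈ pvOffs := by decide

theorem mem_pvRem (S R : List (Int × Int)) (x : Int × Int) :
    x ∈ pvRem S R ↔ x ∈ S ∧ x ∉ R := by
  simp [pvRem, List.mem_filter, PySem.Set.contains_iff]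

theorem pvRem_nil (S : List (Int × Int)) : pvRem S [] = S := by
  simp [pvRem]

theorem pvRem_append (S R : List (Int × Int)) (p : Int × Int) :
    pvRem S (R ++ [p]) = (pvRem S R).filter (fun r => r != p) := by
  rw [pvRem, pvRem, List.filter_filter]
  apply List.filter_congr
  intro x hx
  rw [Bool.eq_iff_iff]
  simp [PySem.Set.contains_iff, List.mem_append, not_or, and_comm]

theorem deg_filter_ne (Rm : List (Int × Int)) (p q : Int × Int)
    (hnb : ¬ ∃ d ∈ pvOffs, ((p.1 + d.1, p.2 + d.2) : Int × Int) = q) :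
    degL (Rm.filter (fun r => r != p)) q = degL Rm q := by
  apply List.countP_congr
  intro d hd
  simp only [decide_eq_true_eq, List.mem_filter, bne_iff_ne]
  constructor
  · rintro ⟨h1, _⟩; exact h1
  · intro h1
    refine ⟨h1, ?_⟩
    intro hc
    apply hnb
    refine ⟨(-d.1, -d.2), offs_neg d hd, ?_⟩
    rw [← hc]
    obtain ⟨a, b⟩ := q
    simp only [Prod.mk.injEq]
    constructor <;> ring

theorem length_filter_ne (l : List (Int × Int)) (hl : l.Nodup) (p : Int × Int) (hp : p ∈ l) :
    (l.filter (fun r => r != p)).length = l.length - 1 := by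
  rw [← List.Nodup.erase_eq_filter hl p]
  exact List.length_erase_of_mem hp

theorem wl_loop (S T : List (Int × Int)) (hS : S.Nodup)
    (hTc : pvClosed S T) (hTmax : ∀ U, pvClosed S U → U ⊆ T) (hTnd : T.Nodup) :
    ∀ (n : Nat) (stack removed : List (Int × Int)),
      removed.Nodup →
      (∀ p ∈ removed, p ∈ S) →
      (∀ U, pvClosed S U → ∀ p ∈ U, p ∉ removed) →
      (∀ q ∈ stack, q ∈ S) →
      (∀ q ∈ stack, q ∉ removed → degL (pvRem S removed) q < 4) →
      (∀ q ∈ S, q ∉ removed → degL (pvRem S removed) q < 4 → q ∈ stack) →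
      stack.length + 8 * (pvRem S removed).length < n →
      pvB_loop n stack S removed = (S.length : Int) - (T.length : Int) := by
  intro n
  induction n with
  | zero => intro stack removed _ _ _ _ _ _ hf; omega
  | succ n ih =>
    intro stack removed hrnd hrS hjust hstS hstdeg hcomp hf
    rw [pvB_loop]
    cases hl : stack.getLast? with
    | none =>
      dsimp only
      have hstack : stack = [] := List.getLast?_eq_none_iff.mp hl
      subst hstack
      have hremnd : (pvRem S removed).Nodup := hS.filter _
      have hremC : pvClosed S (pvRem S removed) := by
        refine ⟨fun x hx => ((mem_pvRem S removed x).mp hx).1, ?_⟩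
        intro q hq
        obtain ⟨hqS, hqR⟩ := (mem_pvRem S removed q).mp hq
        by_contra hlt
        exact (List.not_mem_nil (a := q)) (hcomp q hqS hqR (by omega))
      have h1 : pvRem S removed ⊆ T := hTmax _ hremC
      have h2 : T ⊆ pvRem S removed := by
        intro x hx
        rw [mem_pvRem]
        exact ⟨hTc.1 hx, hjust T hTc x hx⟩
      have hlenT : (pvRem S removed).length = T.length :=
        ((List.perm_ext_iff_of_nodup hremnd hTnd).mpr
          (fun a => ⟨fun h => h1 h, fun h => h2 h⟩)).length_eq
      have hsplit : S.length = (S.filter (fun r => PySem.Set.contains removed r)).length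
          + (pvRem S removed).length := by
        rw [pvRem]; exact List.length_eq_length_filter_add _
      have hremlen : (S.filter (fun r => PySem.Set.contains removed r)).length
          = removed.length := by
        apply List.Perm.length_eq
        apply (List.perm_ext_iff_of_nodup (hS.filter _) hrnd).mpr
        intro a
        simp only [List.mem_filter, PySem.Set.contains_iff]
        exact ⟨fun h => h.2, fun h => ⟨hrS a h, h⟩⟩
      omega
    | some p =>
      dsimp only
      have hsplitstack : stack.dropLast ++ [p] = stack := List.dropLast_append_getLast? p hl
      have hpstack : p ∈ stack := by
        rw [← hsplitstack]; exact List.mem_append_right _ (List.mem_singleton.mpr rfl)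
      have hpS : p ∈ S := hstS p hpstack
      have hlenstack : stack.dropLast.length + 1 = stack.length := by
        conv_rhs => rw [← hsplitstack]
        simp
      have hdropsub : ∀ q ∈ stack.dropLast, q ∈ stack := fun q hq => by
        rw [← hsplitstack]; exact List.mem_append_left _ hq
      by_cases hpr : PySem.Set.contains removed p = true
      · rw [if_pos hpr]
        have hpmem : p ∈ removed := (PySem.Set.contains_iff removed p).mp hpr
        apply ih stack.dropLast removed hrnd hrS hjust
          (fun q hq => hstS q (hdropsub q hq))
          (fun q hq hqr => hstdeg q (hdropsub q hq) hqr)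
          (fun q hqS hqr hdeg => ?_) (by omega)
        have := hcomp q hqS hqr hdeg
        rw [← hsplitstack] at this
        rcases List.mem_append.mp this with h | h
        · exact h
        · exfalso; exact hqr (by rw [List.mem_singleton.mp h]; exact hpmem)
      · rw [if_neg hpr]
        have hpnr : p ∉ removed := by
          intro hc; exact hpr ((PySem.Set.contains_iff removed p).mpr hc)
        have hadd : PySem.Set.add removed p = removed ++ [p] := PySem.Set.add_of_not_mem hpnr
        rw [hadd, PySem.List.foldl_append_if]
        set R' := removed ++ [p] with hR'
        set f : Int × Int → Int × Int := fun d => (p.1 + d.1, p.2 + d.2) with hf_def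
        set pushes := (pvOffs.filter (fun d =>
          PySem.Set.contains S (f d) && !PySem.Set.contains R' (f d)
            && decide (pvB_liveDeg S R' (f d) < 4))).map f with hpushes
        have hpRem : p ∈ pvRem S removed := (mem_pvRem S removed p).mpr ⟨hpS, hpnr⟩
        have hremnd : (pvRem S removed).Nodup := hS.filter _
        have hRem' : pvRem S R' = (pvRem S removed).filter (fun r => r != p) :=
          pvRem_append S removed p
        have hRem'sub : pvRem S R' ⊆ pvRem S removed := by
          rw [hRem']; intro x hx; exact List.mem_of_mem_filter hx
        have hRem'len : (pvRem S R').length + 1 = (pvRem S removed).length := by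
          rw [hRem', length_filter_ne _ hremnd p hpRem]
          have : 0 < (pvRem S removed).length := List.length_pos_of_mem hpRem
          omega
        have hmemR' : ∀ x, x ∈ R' ↔ x ∈ removed ∨ x = p := by
          intro x; rw [hR', List.mem_append, List.mem_singleton]
        apply ih (stack.dropLast ++ pushes) R'
        · rw [hR']
          refine hrnd.append (List.nodup_singleton p) ?_
          intro x hx hx2
          rw [List.mem_singleton] at hx2
          subst hx2
          exact hpnr hx
        · intro x hx
          rcases (hmemR' x).mp hx with h | h
          · exact hrS x h
          · rw [h]; exact hpS
        · intro U hU x hxU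
          rw [hmemR' x]
          push_neg
          have hUrem : U ⊆ pvRem S removed := fun u hu =>
            (mem_pvRem S removed u).mpr ⟨hU.1 hu, hjust U hU u hu⟩
          refine ⟨hjust U hU x hxU, ?_⟩
          intro hxp
          subst hxp
          have h4 : 4 ≤ degL U x := hU.2 x hxU
          have hm : degL U x ≤ degL (pvRem S removed) x := degL_mono x hUrem
          have hlt : degL (pvRem S removed) x < 4 := hstdeg x hpstack hpnr
          omega
        · intro q hq
          rcases List.mem_append.mp hq with h | h
          · exact hstS q (hdropsub q h)
          · rw [hpushes] at h
            obtain ⟨d, hd, rfl⟩ := List.mem_map.mp h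
            obtain ⟨_, hc⟩ := List.mem_filter.mp hd
            have := (Bool.and_eq_true _ _).mp ((Bool.and_eq_true _ _).mp hc).1
            exact (PySem.Set.contains_iff S (f d)).mp this.1
        · intro q hq hqR'
          rcases List.mem_append.mp hq with h | h
          · have hqr : q ∉ removed := fun hc => hqR' ((hmemR' q).mpr (Or.inl hc))
            have := hstdeg q (hdropsub q h) hqr
            have hmono := degL_mono q hRem'sub
            omega
          · rw [hpushes] at h
            obtain ⟨d, hd, rfl⟩ := List.mem_map.mp h
            obtain ⟨_, hc⟩ := List.mem_filter.mp hd
            have hlive := (Bool.and_eq_true _ _).mp hc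
            have := of_decide_eq_true hlive.2
            rw [liveDeg_eq] at this
            omega
        · intro q hqS hqR' hdeg
          by_cases hnb : ∃ d ∈ pvOffs, ((p.1 + d.1, p.2 + d.2) : Int × Int) = q
          · apply List.mem_append_right
            obtain ⟨d, hd, hfd⟩ := hnb
            rw [hpushes]
            apply List.mem_map.mpr
            refine ⟨d, List.mem_filter.mpr ⟨hd, ?_⟩, hfd⟩
            have hfq : f d = q := hfd
            rw [hfq]
            have h1 : PySem.Set.contains S q = true := (PySem.Set.contains_iff S q).mpr hqS
            have h2 : PySem.Set.contains R' q = false := by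
              rw [← Bool.not_eq_true]
              intro hc
              exact hqR' ((PySem.Set.contains_iff R' q).mp hc)
            have h3 : pvB_liveDeg S R' q < 4 := by
              rw [liveDeg_eq]
              omega
            simp only [Bool.and_eq_true, decide_eq_true_eq, Bool.not_eq_true']
            exact ⟨⟨h1, h2⟩, h3⟩
          · rw [hRem', deg_filter_ne _ _ _ hnb] at hdeg
            have hqr : q ∉ removed := fun hc => hqR' ((hmemR' q).mpr (Or.inl hc))
            have := hcomp q hqS hqr hdeg
            rw [← hsplitstack] at this
            rcases List.mem_append.mp this with h | h
            · exact List.mem_append_left _ h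
            · exfalso
              exact hqR' ((hmemR' q).mpr (Or.inr (List.mem_singleton.mp h)))
        · have hple : pushes.length ≤ 8 := by
            rw [hpushes, List.length_map]
            calc (pvOffs.filter _).length ≤ pvOffs.length := List.length_filter_le _ _
              _ = 8 := rfl
          rw [List.length_append]
          omega

theorem altB_eq (g : List String) :
    getMaxAccessibility_alt g
      = ((coords g).length : Int) - ((pvCore ((coords g).length + 1) (coords g)).length : Int) := by
  have hS : (coords g).Nodup := nodup_coords g
  have hT := core_closed ((coords g).length + 1) (coords g) hS (by omega)
  rw [getMaxAccessibility_alt, rollsB_eq]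
  show pvB_loop _ ((coords g).filter _) (coords g) PySem.Set.empty = _
  have hempty : (PySem.Set.empty : PySem.Set (Int × Int)) = ([] : List (Int × Int)) := rfl
  rw [hempty]
  apply wl_loop (coords g) (pvCore ((coords g).length + 1) (coords g)) hS hT
    (fun U hU => core_max _ _ U hS hU) (core_nodup _ _ hS)
  · exact List.nodup_nil
  · intro p hp; cases hp
  · intro U _ p _ hc; cases hc
  · exact fun q hq => (List.mem_filter.mp hq).1
  · intro q hq _
    have := of_decide_eq_true (List.mem_filter.mp hq).2
    rw [liveDeg_eq, pvRem_nil] at this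
    rw [pvRem_nil]
    omega
  · intro q hqS _ hdeg
    apply List.mem_filter.mpr
    refine ⟨hqS, ?_⟩
    rw [pvRem_nil] at hdeg
    apply decide_eq_true
    rw [liveDeg_eq, pvRem_nil]
    omega
  · rw [pvRem_nil]
    have := List.length_filter_le (fun p => decide (pvB_liveDeg (coords g) [] p < 4)) (coords g)
    omega

-- ===== VERDICT (by name: the statement is the Claim_ definition above) =====
theorem getMaxAccessibility_spec : Claim_equal_getMaxAccessibility := by
  intro g _ hpre
  unfold Spec_getMaxAccessibility
  rw [altB_eq]
  have hA : getMaxAccessibility g = pvA_loop ((coords g).length + 1) g 0 := by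
    rw [getMaxAccessibility, coords_length]
  rcases hpre with hfree | hrect
  · have hcnil : coords g = [] := by
      rw [List.eq_nil_iff_forall_not_mem]
      intro p hp
      obtain ⟨h1, h2, h3, h4, h5⟩ := (mem_coords g p).mp hp
      have hrow : g.getD p.2.toNat "" ∈ g := by
        rw [List.getD_eq_getElem g "" h3]
        exact List.getElem_mem _
      apply hfree _ hrow
      rw [← h5]
      rw [atN, List.getD_eq_getElem _ ' ' h4]
      exact List.getElem_mem _
    have hacc : pvA_access g = [] := by
      rw [accessA_eq, hcnil]
      rfl
    rw [hA, hcnil]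
    simp only [List.length_nil, Nat.zero_add]
    rw [pvA_loop]
    simp only [hacc, List.length_nil]
    norm_num [pvCore]
  · have hrect' : Rect g := by
      have hgetD0 : g.getD 0 "" = g.headD "" := by cases g <;> rfl
      intro r hr
      rw [rowLen, hgetD0]
      exact hrect r hr
    rw [hA, loop_eq _ g 0 hrect', count_loop _ _ _ (nodup_coords g)]
    ring
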